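-- pv_equiv track=rewrite | github.com/OsnovaDT/Grokking-Algorithms | chapter_9.py | get_most_similar_word
-- ===== SOURCE A (Python) =====
-- def get_most_similar_word(user_word, similar_words):
--     '''Get most similar word on the user's word'''
--
--     coincidence_for_similar_words = {}
--
--     for similar_word in similar_words:
--         letters_for_words = list(zip(similar_word, user_word))
--
--         number_of_coincidence = 0
--
--         for similar_word_letter, user_word_letter in letters_for_words:
--             if similar_word_letter == user_word_letter:
--                 number_of_coincidence += 1
--
--         coincidence_for_similar_words[similar_word] = number_of_coincidence
--
--     return max(
--         list(coincidence_for_similar_words.items()),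
--         key=lambda word_and_coincidence: word_and_coincidence[1]
--     )[0]
-- ===== SOURCE B (Python) =====
-- def get_most_similar_word(user_word, similar_words):
--     '''Get most similar word on the user's word'''
--     scores = [0] * len(similar_words)
--     width = max(map(len, similar_words))
--     for position, letter in enumerate(user_word[:width]):
--         scores = [
--             score + (position < len(word) and word[position] == letter)
--             for word, score in zip(similar_words, scores)
--         ]
--     return similar_words[scores.index(max(scores))]
-- ===== Notes on version B (the rewrite author's own statement) =====
-- stated objective: alternative
-- what changed: Replaces the per-word dict of counts plus max-over-items with a column-major scan: one pass per position of user_word (capped at the longest candidate's length) updates a parallel score list for all words at once, and the answer is picked by a single index-of-max selection.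
import Mathlib
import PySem

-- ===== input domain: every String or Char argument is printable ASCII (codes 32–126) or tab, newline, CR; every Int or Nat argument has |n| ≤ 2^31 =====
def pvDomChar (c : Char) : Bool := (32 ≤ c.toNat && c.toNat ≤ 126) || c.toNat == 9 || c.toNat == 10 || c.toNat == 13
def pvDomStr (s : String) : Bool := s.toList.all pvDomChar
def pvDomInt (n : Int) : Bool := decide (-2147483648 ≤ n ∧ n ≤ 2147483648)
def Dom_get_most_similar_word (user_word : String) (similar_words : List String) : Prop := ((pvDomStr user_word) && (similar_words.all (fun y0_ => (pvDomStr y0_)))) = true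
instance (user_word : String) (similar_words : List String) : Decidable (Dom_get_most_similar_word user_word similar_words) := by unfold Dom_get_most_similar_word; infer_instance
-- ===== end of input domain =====

-- B replaces A's word-by-word dict-and-max with a column-major scan: one pass per POSITION of
-- user_word (capped at the longest candidate's length) updating a parallel score list, then a
-- single index-of-max selection (alternative decomposition, same cost).


-- ===== PORT A =====
def get_most_similar_word (user_word : String) (similar_words : List String) : String :=
  let coincidence_for_similar_words : PySem.Dict String Int :=
    similar_words.foldl
      (fun d similar_word =>
        let letters_for_words := similar_word.toList.zip user_word.toList
        let number_of_coincidence : Int :=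
          letters_for_words.foldl
            (fun n p => if p.1 == p.2 then n + 1 else n) 0
        d.insert similar_word number_of_coincidence)
      PySem.Dict.empty
  match PySem.List.max? coincidence_for_similar_words.items (fun p => p.2) with
  | some p => p.1
  | none => ""  -- max() on an empty sequence: ValueError, excluded by Pre_

-- ===== PORT B =====
def get_most_similar_word_alt (user_word : String) (similar_words : List String) : String :=
  let scores0 : List Int := List.replicate similar_words.length 0
  match PySem.List.max? (similar_words.map PySem.Str.len) (fun x => x) with
  | none => ""  -- max() on an empty sequence: ValueError, excluded by Pre_
  | some width =>
  let scores :=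
    (PySem.List.enumerate (PySem.Str.slice user_word none (some width)).toList 0).foldl
      (fun scores pl =>
        (similar_words.zip scores).map
          (fun p => p.2 +
            (if pl.1 < PySem.Str.len p.1 ∧ PySem.Str.pyGet? p.1 pl.1 = some pl.2 then 1 else 0)))
      scores0
  match PySem.List.max? scores (fun x => x) with
  | none => ""  -- max() on an empty sequence: ValueError, excluded by Pre_
  | some m =>
    match PySem.List.index? scores m with
    | none => ""  -- unreachable: the max is a member of scores
    | some i =>
      match PySem.List.pyGet? similar_words (i : Int) with
      | some w => w
      | none => ""  -- unreachable: the index is within range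

-- ===== PRECONDITION & SPEC =====
-- On an empty similar_words A raises ValueError (max of an empty sequence) and B raises too; Pre_ excludes exactly that.
def Pre_get_most_similar_word (user_word : String) (similar_words : List String) : Prop :=
  similar_words ≠ []
instance (user_word : String) (similar_words : List String) : Decidable (Pre_get_most_similar_word user_word similar_words) := by unfold Pre_get_most_similar_word; infer_instance

def pvWitness_get_most_similar_word : String × List String := ("word", ["ward", "cord", "word"])

def Spec_get_most_similar_word (user_word : String) (similar_words : List String) (out : String) : Prop := out = get_most_similar_word_alt user_word similar_words
instance (user_word : String) (similar_words : List String) (out : String) : Decidable (Spec_get_most_similar_word user_word similar_words out) := by unfold Spec_get_most_similar_word; infer_instance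

-- ===== CLAIM (what is proved, stated in full; the proofs are below) =====
def Claim_equal_get_most_similar_word : Prop := ∀ (user_word : String) (similar_words : List String), Dom_get_most_similar_word user_word similar_words → Pre_get_most_similar_word user_word similar_words → Spec_get_most_similar_word user_word similar_words (get_most_similar_word user_word similar_words)

-- ===== LEMMAS AND PROOFS =====

-- Positional match count of a word against the user's word (= A's inner loop, = B's column totals).
def pvMatches (user_word word : String) : Int :=
  ((word.toList.zip user_word.toList).countP (fun p => p.1 == p.2) : Int)

-- The running-best step both sides are reduced to.
def pvStep (u : String) (best : String × Int) (word : String) : String × Int :=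
  if pvMatches u word > best.2 then (word, pvMatches u word) else best

-- One column indicator: does word w match u's letter ch at position j?
def pvIndS (w : String) (pl : Int × Char) : Int :=
  if pl.1 < PySem.Str.len w ∧ PySem.Str.pyGet? w pl.1 = some pl.2 then 1 else 0

-- A's inner counting loop computes pvMatches.
theorem pvCountLoop_eq (user_word similar_word : String) :
    (similar_word.toList.zip user_word.toList).foldl
        (fun n p => if p.1 == p.2 then n + 1 else n) (0 : Int)
      = pvMatches user_word similar_word := by
  have h := PySem.List.foldl_count_if (fun q : Char × Char => q.1 == q.2)
    (similar_word.toList.zip user_word.toList) 0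
  simpa [pvMatches] using h

-- Map that rewrites every pair it touches to itself is the identity.
theorem pvMapSelf (l : List (String × Int)) (f : String × Int → String × Int)
    (h : ∀ p ∈ l, f p = p) : l.map f = l := by
  rw [List.map_congr_left h]; simp

-- Invariant: A's dict fold, viewed through max? over its items, is the running-best fold.
theorem pvMaster (u : String) (t : List String) :
    ∀ (d : PySem.Dict String Int) (b : String) (bc : Int),
      d.keys.Nodup →
      (∀ p ∈ d.items, p.2 = pvMatches u p.1) →
      PySem.List.max? d.items (fun p => p.2) = some (b, bc) →
      PySem.List.max? ((t.foldl (fun d w => d.insert w (pvMatches u w)) d).items) (fun p => p.2)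
        = some (t.foldl (pvStep u) (b, bc)) := by
  induction t with
  | nil => intro d b bc _ _ hmax; simpa using hmax
  | cons x t ih =>
    intro d b bc hnd hval hmax
    simp only [List.foldl_cons]
    by_cases hc : d.contains x = true
    · -- x already a key with the same value: the dict (as an items list) is unchanged,
      -- and the running best keeps its pair since pvMatches u x ≤ bc.
      have hx : (x, pvMatches u x) ∈ d.items := by
        have hk : x ∈ d.keys := (PySem.Dict.contains_iff_mem_keys d x).mp hc
        simp only [PySem.Dict.keys, List.mem_map] at hk
        obtain ⟨p, hp, hfst⟩ := hk
        have := hval p hp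
        have : p = (x, pvMatches u x) := by
          cases p; simp_all
        rwa [this] at hp
      have hle : pvMatches u x ≤ bc := by
        have := PySem.List.max?_isMax (key := fun p : String × Int => p.2) hmax _ hx
        simpa using this
      have hitems : (d.insert x (pvMatches u x)).items = d.items := by
        rw [PySem.Dict.items_insert_of_contains d _ hc]
        apply pvMapSelf
        intro p hp
        by_cases hpe : p.1 = x
        · have hv := hval p hp
          cases p with
          | mk p1 p2 => simp only at hpe hv; subst hpe; simp [hv]
        · simp [hpe]
      have hkeys : (d.insert x (pvMatches u x)).keys = d.keys := by
        simp only [PySem.Dict.keys, hitems]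
      have hB : pvStep u (b, bc) x = (b, bc) := by
        have : ¬ pvMatches u x > bc := not_lt.mpr hle
        simp [pvStep, this]
      have := ih (d.insert x (pvMatches u x)) b bc
        (by rw [hkeys]; exact hnd)
        (by rw [hitems]; exact hval)
        (by rw [hitems]; exact hmax)
      simpa [hB] using this
    · -- fresh key: the pair is appended; max? over (items ++ [(x, c x)]) is the strict update.
      have hc' : d.contains x = false := by simpa using hc
      have hitems : (d.insert x (pvMatches u x)).items = d.items ++ [(x, pvMatches u x)] :=
        PySem.Dict.items_insert_of_not_contains d _ hc'
      have hval' : ∀ p ∈ (d.insert x (pvMatches u x)).items, p.2 = pvMatches u p.1 := by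
        intro p hp
        rw [hitems] at hp
        rcases List.mem_append.mp hp with h1 | h2
        · exact hval p h1
        · simp at h2; subst h2; rfl
      have hnd' : (d.insert x (pvMatches u x)).keys.Nodup :=
        PySem.Dict.nodup_keys_insert d x _ hnd
      by_cases hlt : pvMatches u x > bc
      · have hmax' : PySem.List.max? (d.insert x (pvMatches u x)).items (fun p => p.2)
            = some (x, pvMatches u x) := by
          rw [hitems]
          simp only [PySem.List.max?, List.foldl_append] at hmax ⊢
          rw [hmax]
          simp only [gt_iff_lt] at hlt
          simp [hlt]
        have := ih (d.insert x (pvMatches u x)) x (pvMatches u x) hnd' hval' hmax'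
        simpa [pvStep, hlt] using this
      · have hmax' : PySem.List.max? (d.insert x (pvMatches u x)).items (fun p => p.2)
            = some (b, bc) := by
          rw [hitems]
          simp only [PySem.List.max?, List.foldl_append] at hmax ⊢
          rw [hmax]
          simp only [gt_iff_lt] at hlt
          simp [hlt]
        have := ih (d.insert x (pvMatches u x)) b bc hnd' hval' hmax'
        simpa [pvStep, hlt] using this

-- Mapping over a list zipped with a map of itself.
theorem pvZipMap (ws : List String) (f : String → Int) (g : String × Int → Int) :
    (ws.zip (ws.map f)).map g = ws.map (fun w => g (w, f w)) := by
  induction ws with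
  | nil => rfl
  | cons w ws ih => simp [ih]

-- B's column fold, started from any map over ws, adds each word's indicator sum.
theorem pvColFold (es : List (Int × Char)) (ws : List String) :
    ∀ (f : String → Int),
      es.foldl
        (fun scores pl => (ws.zip scores).map (fun p => p.2 + pvIndS p.1 pl))
        (ws.map f)
      = ws.map (fun w => f w + (es.map (pvIndS w)).sum) := by
  induction es with
  | nil => intro f; simp
  | cons e es ih =>
    intro f
    simp only [List.foldl_cons]
    rw [pvZipMap ws f (fun p => p.2 + pvIndS p.1 e)]
    rw [ih (fun w => f w + pvIndS w e)]
    apply List.map_congr_left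
    intro w _
    simp [add_assoc]

-- Per word: the indicator sum over enumerated positions (from k) counts the
-- positional matches of the word's tail from k against the remaining letters.
theorem pvIndSum (w : String) : ∀ (us : List Char) (k : Nat),
    ((PySem.List.enumerate us (k : Int)).map (pvIndS w)).sum
      = (((w.toList.drop k).zip us).countP (fun p => p.1 == p.2) : Int) := by
  intro us
  induction us with
  | nil => intro k; simp
  | cons ch us ih =>
    intro k
    rw [PySem.List.enumerate_cons]
    simp only [List.map_cons, List.sum_cons]
    have hcast : (k : Int) + 1 = ((k + 1 : Nat) : Int) := by push_cast; ring
    rw [hcast, ih (k + 1)]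
    have hlen : PySem.Str.len w = (w.toList.length : Int) := by simp [pysem]
    by_cases hk : k < w.toList.length
    · rw [List.drop_eq_getElem_cons hk]
      simp only [List.zip_cons_cons, List.countP_cons]
      have hget : PySem.Str.pyGet? w (k : Int) = some w.toList[k] := by
        simp [List.getElem?_eq_getElem hk]
      have hind : pvIndS w ((k : Int), ch)
          = if w.toList[k] == ch then 1 else 0 := by
        simp only [pvIndS, hget, hlen, Option.some.injEq]
        have h1 : (k : Int) < (w.toList.length : Int) := by exact_mod_cast hk
        by_cases he : w.toList[k] = ch
        · rw [if_pos ⟨h1, he⟩, if_pos (by simp [he])]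
        · rw [if_neg (fun hn => he hn.2), if_neg (by simp [he])]
      rw [hind]
      push_cast
      split_ifs <;> simp_all <;> ring
    · have h1 : w.toList.drop k = [] := List.drop_eq_nil_of_le (by omega)
      have h2 : w.toList.drop (k + 1) = [] := List.drop_eq_nil_of_le (by omega)
      have hind : pvIndS w ((k : Int), ch) = 0 := by
        simp only [pvIndS, hlen]
        apply if_neg
        rintro ⟨hlt, -⟩
        have : k < w.toList.length := by exact_mod_cast hlt
        omega
      rw [hind, h1, h2]
      simp

-- The whole column loop computes the per-word match counts.
theorem pvCols (u : String) (ws : List String) :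
    (PySem.List.enumerate u.toList 0).foldl
        (fun scores pl =>
          (ws.zip scores).map
            (fun p => p.2 +
              (if pl.1 < PySem.Str.len p.1 ∧ PySem.Str.pyGet? p.1 pl.1 = some pl.2 then 1 else 0)))
        (List.replicate ws.length 0)
      = ws.map (pvMatches u) := by
  have hrep : (List.replicate ws.length (0 : Int)) = ws.map (fun _ => 0) := by
    simp
  have hfun : (fun (scores : List Int) (pl : Int × Char) =>
      (ws.zip scores).map
        (fun p => p.2 +
          (if pl.1 < PySem.Str.len p.1 ∧ PySem.Str.pyGet? p.1 pl.1 = some pl.2 then 1 else 0)))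
      = (fun scores pl => (ws.zip scores).map (fun p => p.2 + pvIndS p.1 pl)) := by
    funext scores pl
    simp [pvIndS]
  rw [hrep, hfun, pvColFold (PySem.List.enumerate u.toList 0) ws (fun _ => 0)]
  apply List.map_congr_left
  intro w _
  have h := pvIndSum w u.toList 0
  simp only [Nat.cast_zero] at h
  simp [h, pvMatches]

-- Zipping against a long-enough prefix is zipping against the whole list.
theorem pvZipTake (l l' : List Char) (n : Nat) (h : l.length ≤ n) :
    l.zip (l'.take n) = l.zip l' := by
  induction l generalizing l' n with
  | nil => simp
  | cons a l ih =>
    cases l' with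
    | nil => simp
    | cons b l' =>
      cases n with
      | zero => simp at h
      | succ n => simp_all [List.zip_cons_cons]

-- Match counts against a wide-enough prefix slice of the user's word are unchanged.
theorem pvSliceMatch (u w : String) (width : Int) (h : PySem.Str.len w ≤ width) :
    pvMatches (PySem.Str.slice u none (some width)) w = pvMatches u w := by
  have hlen : PySem.Str.len w = (w.toList.length : Int) := by simp [pysem]
  have h0 : 0 ≤ width := le_trans (by rw [hlen]; positivity) h
  have hW : width = ((width.toNat : Nat) : Int) := by omega
  have hsl : (PySem.Str.slice u none (some width)).toList = u.toList.take width.toNat := by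
    rw [hW]; simp [pysem]
  have hwle : w.toList.length ≤ width.toNat := by rw [hlen] at h; omega
  simp only [pvMatches, hsl, pvZipTake w.toList u.toList width.toNat hwle]

-- If nothing in the tail strictly beats the current best, the fold keeps it.
theorem pvFoldStay (u : String) : ∀ (t : List String) (b : String) (bc : Int),
    (∀ w ∈ t, pvMatches u w ≤ bc) → t.foldl (pvStep u) (b, bc) = (b, bc) := by
  intro t
  induction t with
  | nil => intro b bc _; rfl
  | cons x t ih =>
    intro b bc h
    have hx : ¬ pvMatches u x > bc := not_lt.mpr (h x (by simp))
    simp only [List.foldl_cons, pvStep, if_neg hx]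
    exact ih b bc (fun w hw => h w (by simp [hw]))

-- Selection (given the max value m): the first index of m in the score list picks
-- the running-best word.
theorem pvSelAux (u : String) : ∀ (t : List String) (b : String) (m : Int),
    PySem.List.max? ((b :: t).map (pvMatches u)) (fun x => x) = some m →
    (match PySem.List.index? ((b :: t).map (pvMatches u)) m with
      | none => ""
      | some i =>
        match PySem.List.pyGet? (b :: t) (i : Int) with
        | some w => w
        | none => "")
      = (t.foldl (pvStep u) (b, pvMatches u b)).1 := by
  intro t
  induction t with
  | nil =>
    intro b m hm
    have he : pvMatches u b = m := by simpa [PySem.List.max?] using hm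
    subst he
    simp only [List.map_cons, List.map_nil]
    rw [PySem.List.index?_cons_self]
    simp
  | cons x t ih =>
    intro b m hm
    -- head-reduction of max?: the two heads fight, the winner heads the shorter list
    have hmaxred : PySem.List.max? ((b :: x :: t).map (pvMatches u)) (fun x => x)
        = PySem.List.max?
            (((if pvMatches u b < pvMatches u x then x else b) :: t).map (pvMatches u))
            (fun x => x) := by
      simp only [List.map_cons, PySem.List.max?]
      by_cases h : pvMatches u b < pvMatches u x <;> simp [h, List.foldl_cons]
    rw [hmaxred] at hm
    by_cases hbx : pvMatches u b < pvMatches u x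
    · -- the new head x strictly wins: b can never carry the max value
      rw [if_pos hbx] at hm
      have hxm : pvMatches u x ≤ m :=
        PySem.List.max?_isMax hm (pvMatches u x) (by simp)
      have hbm : pvMatches u b ≠ m := by omega
      have hmem : m ∈ (x :: t).map (pvMatches u) := PySem.List.max?_mem hm
      have hfold : (x :: t).foldl (pvStep u) (b, pvMatches u b)
          = t.foldl (pvStep u) (x, pvMatches u x) := by
        simp [List.foldl_cons, pvStep, hbx]
      rw [hfold]
      cases hi : PySem.List.index? ((x :: t).map (pvMatches u)) m with
      | none =>
        have hs := (PySem.List.index?_isSome_iff ((x :: t).map (pvMatches u)) m).mpr hmem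
        rw [hi] at hs
        simp at hs
      | some i =>
        have hidx : PySem.List.index? ((b :: x :: t).map (pvMatches u)) m = some (i + 1) := by
          simp only [List.map_cons]
          rw [PySem.List.index?_cons_of_ne _ hbm]
          simp only [List.map_cons] at hi
          rw [hi]; rfl
        have hget : PySem.List.pyGet? (b :: x :: t) ((i + 1 : Nat) : Int)
            = PySem.List.pyGet? (x :: t) (i : Int) := by simp
        have := ih x m hm
        rw [hi] at this
        simp only [hidx, hget]
        exact this
    · -- the old head b survives: dropping x does not move the first max
      rw [if_neg hbx] at hm
      have hmem : m ∈ (b :: t).map (pvMatches u) := PySem.List.max?_mem hm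
      have hbm : pvMatches u b ≤ m :=
        PySem.List.max?_isMax hm (pvMatches u b) (by simp)
      have hfold : (x :: t).foldl (pvStep u) (b, pvMatches u b)
          = t.foldl (pvStep u) (b, pvMatches u b) := by
        simp only [List.foldl_cons]
        have : ¬ pvMatches u x > pvMatches u b := hbx
        simp [pvStep, this]
      rw [hfold]
      have := ih b m hm
      by_cases hbeq : pvMatches u b = m
      · -- the head already carries the max value: both indices are 0
        have hidx1 : PySem.List.index? ((b :: x :: t).map (pvMatches u)) m = some 0 := by
          simp only [List.map_cons]
          rw [← hbeq]
          exact PySem.List.index?_cons_self _ _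
        have hstay : t.foldl (pvStep u) (b, pvMatches u b) = (b, pvMatches u b) := by
          apply pvFoldStay
          intro w hw
          have := PySem.List.max?_isMax hm (pvMatches u w)
            (List.mem_map.mpr ⟨w, by simp [hw], rfl⟩)
          omega
        simp only [hidx1, hstay]
        simp
      · -- the max sits in the tail: both heads b and x are below it
        have hxm : pvMatches u x ≠ m := by
          have : pvMatches u x ≤ pvMatches u b := by omega
          omega
        have hmt : m ∈ t.map (pvMatches u) := by
          rcases (by simpa using hmem : m = pvMatches u b ∨ ∃ a ∈ t, pvMatches u a = m) with
            h | ⟨a, ha, hae⟩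
          · exact absurd h.symm hbeq
          · exact List.mem_map.mpr ⟨a, ha, hae⟩
        cases hi : PySem.List.index? (t.map (pvMatches u)) m with
        | none =>
          have hs := (PySem.List.index?_isSome_iff (t.map (pvMatches u)) m).mpr hmt
          rw [hi] at hs
          simp at hs
        | some i =>
          have hidx1 : PySem.List.index? ((b :: x :: t).map (pvMatches u)) m
              = some (i + 1 + 1) := by
            simp only [List.map_cons]
            rw [PySem.List.index?_cons_of_ne _ hbeq, PySem.List.index?_cons_of_ne _ hxm, hi]
            rfl
          have hidx2 : PySem.List.index? ((b :: t).map (pvMatches u)) m = some (i + 1) := by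
            simp only [List.map_cons]
            rw [PySem.List.index?_cons_of_ne _ hbeq, hi]
            rfl
          rw [hidx2] at this
          have e1 : PySem.List.pyGet? (b :: t) ((i + 1 : Nat) : Int) = t[i]? := by simp
          have e2 : PySem.List.pyGet? (b :: x :: t) ((i + 1 + 1 : Nat) : Int) = t[i]? := by
            rw [PySem.List.pyGet?_natCast]; simp
          simp only [hidx1]
          simp only [e2]
          simp only [e1] at this
          exact this

-- Selection: index-of-max over the score list picks the running-best word.
theorem pvSel (u : String) (t : List String) (b : String) :
    (match PySem.List.max? ((b :: t).map (pvMatches u)) (fun x => x) with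
      | none => ""
      | some m =>
        match PySem.List.index? ((b :: t).map (pvMatches u)) m with
        | none => ""
        | some i =>
          match PySem.List.pyGet? (b :: t) (i : Int) with
          | some w => w
          | none => "")
      = (t.foldl (pvStep u) (b, pvMatches u b)).1 := by
  cases hm : PySem.List.max? ((b :: t).map (pvMatches u)) (fun x => x) with
  | none => simp [PySem.List.max?_eq_none_iff] at hm
  | some m => exact pvSelAux u t b m hm

-- ===== VERDICT (by name: the statement is the Claim_ definition above) =====
theorem get_most_similar_word_spec : Claim_equal_get_most_similar_word := by
  intro u ws _ hpre
  unfold Spec_get_most_similar_word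
  match ws with
  | [] => exact absurd rfl hpre
  | w :: t =>
    unfold get_most_similar_word get_most_similar_word_alt
    -- A's fold function is insertion of pvMatches
    have hfun : (fun (d : PySem.Dict String Int) similar_word =>
        let letters_for_words := similar_word.toList.zip u.toList
        let number_of_coincidence : Int :=
          letters_for_words.foldl (fun n p => if p.1 == p.2 then n + 1 else n) 0
        d.insert similar_word number_of_coincidence)
        = (fun d w => d.insert w (pvMatches u w)) := by
      funext d sw
      simp only [pvCountLoop_eq]
    simp only [hfun, List.foldl_cons]
    have h0 : (PySem.Dict.empty.insert w (pvMatches u w)).items = [(w, pvMatches u w)] := by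
      rw [PySem.Dict.items_insert_of_not_contains _ _ (by simp [pysem])]
      rfl
    have hmax0 : PySem.List.max? (PySem.Dict.empty.insert w (pvMatches u w)).items
        (fun p : String × Int => p.2) = some (w, pvMatches u w) := by
      rw [h0]; rfl
    have hnd0 : (PySem.Dict.empty.insert w (pvMatches u w)).keys.Nodup := by
      simp only [PySem.Dict.keys, h0]; simp
    have hval0 : ∀ p ∈ (PySem.Dict.empty.insert w (pvMatches u w)).items,
        p.2 = pvMatches u p.1 := by
      intro p hp; rw [h0] at hp; simp at hp; subst hp; rfl
    rw [pvMaster u t _ w (pvMatches u w) hnd0 hval0 hmax0]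
    cases hW : PySem.List.max? ((w :: t).map PySem.Str.len) (fun x => x) with
    | none => simp [PySem.List.max?_eq_none_iff] at hW
    | some width =>
      simp only [hW]
      rw [pvCols (PySem.Str.slice u none (some width)) (w :: t)]
      have hmapeq : (w :: t).map (pvMatches (PySem.Str.slice u none (some width)))
          = (w :: t).map (pvMatches u) := by
        apply List.map_congr_left
        intro w' hw'
        exact pvSliceMatch u w' width
          (PySem.List.max?_isMax hW (PySem.Str.len w') (List.mem_map.mpr ⟨w', hw', rfl⟩))
      rw [hmapeq]
      exact (pvSel u t w).symm
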